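-- pv_equiv track=rewrite | github.com/Maan2003/cp | Codeforces/1619/B/naive.py | solve
-- ===== SOURCE A (Python) =====
-- def solve(n):
--     s = set()
--     for i in range(1, n):
--         if (i * i) <= n:
--             s.add(i * i)
--         if (i * i * i) <= n:
--             s.add(i * i * i)
--     return len(s)
-- ===== SOURCE B (Python) =====
-- def solve(n):
--     s = set()
--     i = 1
--     while i * i <= n:
--         s.add(i * i)
--         i += 1
--     i = 1
--     while i * i * i <= n:
--         s.add(i * i * i)
--         i += 1
--     return len(s)
-- ===== Notes on version B (the rewrite author's own statement) =====
-- stated objective: faster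
-- what changed: B enumerates only the bases themselves in two while-loops that stop as soon as i*i (resp. i*i*i) exceeds n, instead of A's scan over every i in range(1, n).
-- intended difference: For n = 1 A returns 0 because its range(1, n) excludes base 1, while B returns 1, the intended count since 1 = 1^2 <= 1 is a perfect square not exceeding n. — e.g. on solve(1): A returns 0, B returns 1
import Mathlib
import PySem

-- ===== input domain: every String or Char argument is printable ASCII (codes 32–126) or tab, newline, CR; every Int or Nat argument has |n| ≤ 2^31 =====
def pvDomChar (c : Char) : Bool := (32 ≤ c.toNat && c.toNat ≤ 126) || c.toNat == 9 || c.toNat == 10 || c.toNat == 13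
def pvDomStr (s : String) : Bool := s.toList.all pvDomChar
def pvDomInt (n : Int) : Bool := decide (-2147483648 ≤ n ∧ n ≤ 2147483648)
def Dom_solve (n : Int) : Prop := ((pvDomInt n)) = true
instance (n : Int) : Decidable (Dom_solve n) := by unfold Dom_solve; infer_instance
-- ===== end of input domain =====

-- B replaces A's O(n) scan of all i in range(1, n) by two while-loops that stop at the
-- square/cube root (O(sqrt n)); return-value equivalence proved outside D_solve below.

-- ===== PORT A =====
def solve (n : Int) : Int :=
  let s : PySem.Set Int := PySem.Set.empty
  let s := (PySem.List.pyRange 1 n 1).foldl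
    (fun s i =>
      let s := if i * i ≤ n then PySem.Set.add s (i * i) else s
      if i * i * i ≤ n then PySem.Set.add s (i * i * i) else s) s
  PySem.Set.len s

-- ===== PORT B =====
-- first while-loop of Source B, 'while i*i <= n: s.add(i*i); i += 1', with the standard
-- fuel bound (n.toNat steps suffice: the loop runs while i <= n); exact for the stated fuel
def solveSqLoop (n : Int) (s : PySem.Set Int) (i : Int) : Nat → PySem.Set Int
  | 0 => s
  | fuel + 1 =>
    if i * i ≤ n then solveSqLoop n (PySem.Set.add s (i * i)) (i + 1) fuel else s

-- second while-loop of Source B, 'while i*i*i <= n: s.add(i*i*i); i += 1'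
def solveCuLoop (n : Int) (s : PySem.Set Int) (i : Int) : Nat → PySem.Set Int
  | 0 => s
  | fuel + 1 =>
    if i * i * i ≤ n then solveCuLoop n (PySem.Set.add s (i * i * i)) (i + 1) fuel else s

def solve_alt (n : Int) : Int :=
  PySem.Set.len (solveCuLoop n (solveSqLoop n PySem.Set.empty 1 n.toNat) 1 n.toNat)

-- ===== PRECONDITION & SPEC =====
-- For n = 1, A returns 0 (its range(1, n) stops before base 1) while B returns 1,
-- the intended count since 1 = 1^2 ≤ 1 is a square not exceeding n.
def D_solve (n : Int) : Prop := n = 1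
instance (n : Int) : Decidable (D_solve n) := by unfold D_solve; infer_instance

def Spec_solve (n : Int) (out : Int) : Prop := ¬ D_solve n → out = solve_alt n
instance (n : Int) (out : Int) : Decidable (Spec_solve n out) := by unfold Spec_solve; infer_instance

def pvDiffWitness_solve : Int := 1
def pvDiffWitnessOut_solve : Int × Int := (0, 1)

-- ===== CLAIM (what is proved, stated in full; the proofs are below) =====
def Claim_unchanged_solve : Prop := ∀ (n : Int), Dom_solve n → Spec_solve n (solve n)
def Claim_changed_solve : Prop := Dom_solve (pvDiffWitness_solve) ∧ D_solve (pvDiffWitness_solve) ∧ solve (pvDiffWitness_solve) = pvDiffWitnessOut_solve.1 ∧ solve_alt (pvDiffWitness_solve) = pvDiffWitnessOut_solve.2 ∧ pvDiffWitnessOut_solve.1 ≠ pvDiffWitnessOut_solve.2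
def Claim_exact_solve : Prop := ∀ (n : Int), Dom_solve n → D_solve n → solve n ≠ solve_alt n

-- ===== LEMMAS AND PROOFS =====

theorem mem_solveSqLoop (n : Int) (fuel : Nat) (i : Int) (s : PySem.Set Int)
    (hi : 1 ≤ i) (hf : (n + 1 - i).toNat ≤ fuel) (x : Int) :
    x ∈ solveSqLoop n s i fuel ↔ x ∈ s ∨ ∃ j, i ≤ j ∧ j * j ≤ n ∧ x = j * j := by
  induction fuel generalizing i s with
  | zero =>
    simp only [solveSqLoop]
    constructor
    · exact Or.inl
    · rintro (hs | ⟨j, hj, hjn, rfl⟩)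
      · exact hs
      · have hjj : j ≤ j * j := le_mul_of_one_le_left (by omega) (by omega)
        omega
  | succ fuel ih =>
    simp only [solveSqLoop]
    split_ifs with h
    · have hin : i ≤ n := le_trans (le_mul_of_one_le_left (by omega) hi) h
      rw [ih _ _ (by omega) (by omega)]
      simp only [PySem.Set.mem_add]
      constructor
      · rintro ((hs | rfl) | ⟨j, hj, hjn, rfl⟩)
        · exact Or.inl hs
        · exact Or.inr ⟨i, le_refl _, h, rfl⟩
        · exact Or.inr ⟨j, by omega, hjn, rfl⟩
      · rintro (hs | ⟨j, hj, hjn, rfl⟩)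
        · exact Or.inl (Or.inl hs)
        · rcases eq_or_lt_of_le hj with rfl | hlt
          · exact Or.inl (Or.inr rfl)
          · exact Or.inr ⟨j, by omega, hjn, rfl⟩
    · constructor
      · exact Or.inl
      · rintro (hs | ⟨j, hj, hjn, rfl⟩)
        · exact hs
        · exact absurd (le_trans (mul_le_mul hj hj (by omega) (by omega)) hjn) h

theorem mem_solveCuLoop (n : Int) (fuel : Nat) (i : Int) (s : PySem.Set Int)
    (hi : 1 ≤ i) (hf : (n + 1 - i).toNat ≤ fuel) (x : Int) :
    x ∈ solveCuLoop n s i fuel ↔ x ∈ s ∨ ∃ j, i ≤ j ∧ j * j * j ≤ n ∧ x = j * j * j := by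
  induction fuel generalizing i s with
  | zero =>
    simp only [solveCuLoop]
    constructor
    · exact Or.inl
    · rintro (hs | ⟨j, hj, hjn, rfl⟩)
      · exact hs
      · have hjj : j ≤ j * j := le_mul_of_one_le_left (by omega) (by omega)
        have hjjj : j * j ≤ j * j * j := le_mul_of_one_le_right (by nlinarith) (by omega)
        omega
  | succ fuel ih =>
    simp only [solveCuLoop]
    split_ifs with h
    · have h2 : i ≤ i * i := le_mul_of_one_le_left (by omega) hi
      have h3 : i * i ≤ i * i * i := le_mul_of_one_le_right (by nlinarith) hi
      have hin : i ≤ n := by omega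
      rw [ih _ _ (by omega) (by omega)]
      simp only [PySem.Set.mem_add]
      constructor
      · rintro ((hs | rfl) | ⟨j, hj, hjn, rfl⟩)
        · exact Or.inl hs
        · exact Or.inr ⟨i, le_refl _, h, rfl⟩
        · exact Or.inr ⟨j, by omega, hjn, rfl⟩
      · rintro (hs | ⟨j, hj, hjn, rfl⟩)
        · exact Or.inl (Or.inl hs)
        · rcases eq_or_lt_of_le hj with rfl | hlt
          · exact Or.inl (Or.inr rfl)
          · exact Or.inr ⟨j, by omega, hjn, rfl⟩
    · constructor
      · exact Or.inl
      · rintro (hs | ⟨j, hj, hjn, rfl⟩)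
        · exact hs
        · have hsq : i * i ≤ j * j := mul_le_mul hj hj (by omega) (by omega)
          have hcube : i * i * i ≤ j * j * j :=
            mul_le_mul hsq hj (by omega) (mul_nonneg (by omega) (by omega))
          exact absurd (le_trans hcube hjn) h

theorem nodup_solveSqLoop (n : Int) (fuel : Nat) (i : Int) (s : PySem.Set Int)
    (hs : s.Nodup) : (solveSqLoop n s i fuel).Nodup := by
  induction fuel generalizing i s with
  | zero => exact hs
  | succ fuel ih =>
    simp only [solveSqLoop]
    split_ifs
    · exact ih _ _ (PySem.Set.nodup_add _ _ hs)
    · exact hs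

theorem nodup_solveCuLoop (n : Int) (fuel : Nat) (i : Int) (s : PySem.Set Int)
    (hs : s.Nodup) : (solveCuLoop n s i fuel).Nodup := by
  induction fuel generalizing i s with
  | zero => exact hs
  | succ fuel ih =>
    simp only [solveCuLoop]
    split_ifs
    · exact ih _ _ (PySem.Set.nodup_add _ _ hs)
    · exact hs

-- membership in A's fold
theorem mem_foldA (n : Int) (l : List Int) (s : PySem.Set Int) (x : Int) :
    x ∈ l.foldl (fun s i =>
      let s := if i * i ≤ n then PySem.Set.add s (i * i) else s
      if i * i * i ≤ n then PySem.Set.add s (i * i * i) else s) s ↔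
    x ∈ s ∨ ∃ i ∈ l, (i * i ≤ n ∧ x = i * i) ∨ (i * i * i ≤ n ∧ x = i * i * i) := by
  induction l generalizing s with
  | nil => simp
  | cons a l ih =>
    rw [List.foldl_cons, ih]
    have hstep : ∀ (t : PySem.Set Int),
        x ∈ (let s := if a * a ≤ n then PySem.Set.add t (a * a) else t
             if a * a * a ≤ n then PySem.Set.add s (a * a * a) else s) ↔
        x ∈ t ∨ (a * a ≤ n ∧ x = a * a) ∨ (a * a * a ≤ n ∧ x = a * a * a) := by
      intro t
      split_ifs <;> simp [PySem.Set.mem_add] <;> tauto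
    rw [hstep]
    simp only [List.mem_cons]
    constructor
    · rintro ((hs | hc) | ⟨i, hi, hc⟩)
      · exact Or.inl hs
      · exact Or.inr ⟨a, Or.inl rfl, hc⟩
      · exact Or.inr ⟨i, Or.inr hi, hc⟩
    · rintro (hs | ⟨i, (rfl | hi), hc⟩)
      · exact Or.inl (Or.inl hs)
      · exact Or.inl (Or.inr hc)
      · exact Or.inr ⟨i, hi, hc⟩

theorem nodup_foldA (n : Int) (l : List Int) (s : PySem.Set Int) (hs : s.Nodup) :
    (l.foldl (fun s i =>
      let s := if i * i ≤ n then PySem.Set.add s (i * i) else s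
      if i * i * i ≤ n then PySem.Set.add s (i * i * i) else s) s).Nodup := by
  induction l generalizing s with
  | nil => exact hs
  | cons a l ih =>
    rw [List.foldl_cons]
    apply ih
    dsimp only
    split_ifs <;> first
      | exact PySem.Set.nodup_add _ _ (PySem.Set.nodup_add _ _ hs)
      | exact PySem.Set.nodup_add _ _ hs
      | exact hs

-- ===== VERDICT (by name: the statement is the Claim_ definition above) =====
theorem solve_spec : Claim_unchanged_solve := by
  intro n _ hD
  have hn1 : n ≠ 1 := hD
  unfold solve solve_alt
  apply congrArg
  apply List.Perm.length_eq
  have hne : (PySem.Set.empty : PySem.Set Int).Nodup := List.nodup_nil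
  rw [List.perm_ext_iff_of_nodup (nodup_foldA n _ PySem.Set.empty hne)
    (nodup_solveCuLoop n n.toNat 1 _ (nodup_solveSqLoop n n.toNat 1 PySem.Set.empty hne))]
  intro x
  rw [mem_foldA, mem_solveCuLoop n n.toNat 1 _ (by omega) (by omega),
    mem_solveSqLoop n n.toNat 1 _ (by omega) (by omega)]
  simp only [PySem.Set.empty, List.not_mem_nil, false_or, PySem.List.mem_pyRange_one]
  constructor
  · rintro ⟨i, ⟨h1, hlt⟩, hc⟩
    rcases hc with ⟨hle, rfl⟩ | ⟨hle, rfl⟩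
    · exact Or.inl ⟨i, h1, hle, rfl⟩
    · exact Or.inr ⟨i, h1, hle, rfl⟩
  · rintro (⟨j, h1, hle, rfl⟩ | ⟨j, h1, hle, rfl⟩)
    · refine ⟨j, ⟨h1, ?_⟩, Or.inl ⟨hle, rfl⟩⟩
      have hjn : j ≤ n := le_trans (le_mul_of_one_le_left (by omega) h1) hle
      rcases lt_or_eq_of_le hjn with h | rfl
      · exact h
      · have h2 : 2 ≤ j := by omega
        nlinarith
    · refine ⟨j, ⟨h1, ?_⟩, Or.inr ⟨hle, rfl⟩⟩
      have hjj : j ≤ j * j * j := by nlinarith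
      have hjn : j ≤ n := le_trans hjj hle
      rcases lt_or_eq_of_le hjn with h | rfl
      · exact h
      · have h2 : 2 ≤ j := by omega
        have hsq : 2 * j ≤ j * j := by nlinarith
        have hcu : 2 * (j * j) ≤ j * j * j := by nlinarith
        nlinarith

theorem solve_changed : Claim_changed_solve := by
  unfold Claim_changed_solve; decide

theorem solve_tight : Claim_exact_solve := by
  intro n _ hD
  subst hD
  decide
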